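-- pv_equiv track=rewrite | github.com/ericmerle3789/Collatz-Junction-Theorem | scripts/research/r50_z_structure.py | compute_slice_distribution_full
-- ===== SOURCE A (Python) =====
-- from math import comb, gcd, ceil, log2, sqrt, pi
-- from itertools import combinations_with_replacement
--
-- def compute_S(k):
--     """Minimal S such that 2^S > 3^k."""
--     S = ceil(k * log2(3))
--     three_k = 3 ** k
--     while (1 << S) <= three_k:
--         S += 1
--     while S > 0 and (1 << (S - 1)) > three_k:
--         S -= 1
--     return S
--
-- def compute_g(k, p):
--     """g = 2 * 3^{-1} mod p. Returns None if 3 not invertible."""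
--     if gcd(3, p) != 1:
--         return None
--     return (2 * pow(3, -1, p)) % p
--
-- def compute_slice_distribution_full(k, p, b0, g=None):
--     """Compute N_{b0,r} = full distribution of slice b0 including shift.
--
--     N_{b0,r} = #{(B1,...,B_{k-1}) monotone with b0<=B1<=...<=B_{k-1}<=max_B :
--                 2^{b0} + g*Sum_{j=1}^{k-1} g^{j-1}*2^{B_j} = r mod p}
--
--     For k>=3, the last component B_{k-1}=max_B is forced.
--     Returns: (count_array_of_length_p, C_{b0})
--     """
--     S_val = compute_S(k)
--     max_B = S_val - k
--     if g is None:
--         g = compute_g(k, p)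
--
--     count = [0] * p
--     n_vecs = 0
--     shift = pow(2, b0, p)
--
--     if k == 1:
--         if b0 == max_B:
--             r = shift % p
--             count[r] += 1
--             n_vecs = 1
--         return count, n_vecs
--
--     if k == 2:
--         r = (shift + g * pow(2, max_B, p)) % p
--         count[r] += 1
--         n_vecs = 1
--         return count, n_vecs
--
--     # k >= 3: enumerate tails (B1,...,B_{k-2}) with b0<=B1<=...<=B_{k-2}<=max_B
--     # B_{k-1} = max_B is forced
--     g_pows = [pow(g, j, p) for j in range(k)]
--     two_pows_mod = [pow(2, b, p) for b in range(max_B + 1)]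
--     last_term = (g_pows[k - 1] * two_pows_mod[max_B]) % p
--     tail_len = k - 2  # number of free components
--
--     for combo in combinations_with_replacement(range(b0, max_B + 1), tail_len):
--         res = shift
--         for idx, bj in enumerate(combo):
--             res = (res + g_pows[idx + 1] * two_pows_mod[bj]) % p
--         res = (res + last_term) % p
--         count[res] += 1
--         n_vecs += 1
--
--     return count, n_vecs
-- ===== SOURCE B (Python) =====
-- from math import gcd
--
-- def compute_slice_distribution_full(k, p, b0, g=None):
--     """DP re-implementation: count monotone tails by (value, position, residue)
--     instead of enumerating every tuple."""
--     three_k = 3 ** k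
--     S = three_k.bit_length()          # minimal S with 2^S > 3^k (3^k is odd)
--     max_B = S - k
--     if g is None:
--         if gcd(3, p) == 1:
--             g = (2 * pow(3, -1, p)) % p
--     shift = pow(2, b0, p)
--
--     if k == 1:
--         count = [0] * p
--         if b0 == max_B:
--             count[shift % p] += 1
--             return count, 1
--         return count, 0
--
--     if k == 2:
--         count = [0] * p
--         count[(shift + g * pow(2, max_B, p)) % p] += 1
--         return count, 1
--
--     # k >= 3: T[j][r] = number of monotone (B_j,...,B_t) with values in
--     # [v, max_B] and sum_{i=j}^{t} g^i * 2^{B_i} = r (mod p), t = k - 2.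
--     t = k - 2
--     if max_B < b0:          # empty value range: no monotone tail exists
--         return [0] * p, 0
--     g_pows = [pow(g, j, p) for j in range(t + 1)]
--     T = [[0] * p for _ in range(t + 2)]
--     T[t + 1][0] = 1
--     for v in range(max_B, b0 - 1, -1):
--         twov = pow(2, v, p)
--         for j in range(t, 0, -1):
--             wj = (g_pows[j] * twov) % p
--             nxt = T[j + 1]
--             row = T[j]
--             T[j] = [row[r] + nxt[(r - wj) % p] for r in range(p)]
--     off = (shift + pow(g, k - 1, p) * pow(2, max_B, p)) % p
--     count = [T[1][(s - off) % p] for s in range(p)]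
--     return count, sum(T[1])
-- ===== Notes on version B (the rewrite author's own statement) =====
-- stated objective: faster
-- what changed: A enumerates every monotone tail via combinations_with_replacement (exponential in k) and re-folds each tuple's weighted sum; B counts tails with a dynamic program over (value, position, residue), adding one value level at a time, so no tuple is ever materialised; intended as faster (asymptotic), a timing run measured 17x-35x where both finish, though B's k*p DP table can exhaust memory on some very large inputs on which A times out too.
-- outside the precondition, e.g. on compute_slice_distribution_full(2, 5, -1, None): A returns ([0, 0, 0, 0, 1], 1), B returns ([0, 0, 0, 0, 1], 1); on compute_slice_distribution_full(1, -3, 0, None): A returns ([], 0), B returns ([], 0); on compute_slice_distribution_full(3, 5, -1, None): A returns ([1, 1, 0, 2, 0], 4), B returns ([1, 1, 0, 1, 1], 4)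
import Mathlib
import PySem

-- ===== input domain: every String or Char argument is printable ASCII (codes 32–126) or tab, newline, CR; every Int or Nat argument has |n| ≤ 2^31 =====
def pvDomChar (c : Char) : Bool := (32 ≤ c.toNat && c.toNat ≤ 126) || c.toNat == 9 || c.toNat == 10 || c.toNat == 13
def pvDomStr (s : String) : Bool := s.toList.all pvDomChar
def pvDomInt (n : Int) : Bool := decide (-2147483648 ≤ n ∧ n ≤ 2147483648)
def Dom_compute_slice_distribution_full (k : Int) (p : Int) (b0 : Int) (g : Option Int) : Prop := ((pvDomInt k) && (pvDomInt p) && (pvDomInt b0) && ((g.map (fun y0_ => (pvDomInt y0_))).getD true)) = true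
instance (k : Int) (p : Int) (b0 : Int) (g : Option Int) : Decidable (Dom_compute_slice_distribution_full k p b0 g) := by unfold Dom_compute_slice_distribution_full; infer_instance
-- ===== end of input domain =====

-- B replaces A's exponential enumeration of all monotone tails by a DP over
-- (value, position, residue); return values agree on the stated precondition.

-- ===== PORT A =====

-- compute_S: 'while (1 << S) <= three_k: S += 1' (fuel-bounded; 2*k+2 always suffices)
def pvUp (t : Nat) : Nat → Nat → Nat
  | 0, S => S
  | f + 1, S => if 2 ^ S ≤ t then pvUp t f (S + 1) else S

-- compute_S: 'while S > 0 and (1 << (S - 1)) > three_k: S -= 1' (fuel-bounded)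
def pvDown (t : Nat) : Nat → Nat → Nat
  | 0, S => S
  | f + 1, S => if 0 < S ∧ t < 2 ^ (S - 1) then pvDown t f (S - 1) else S

-- compute_S(k).  The float seed 'ceil(k*log2(3))' cannot be ported; we seed the
-- first while loop at 0 instead — the two correction loops make the result
-- (the least S with 2^S > 3^k) independent of the seed, so this is exact.
def computeS (k : Nat) : Nat :=
  let t := 3 ^ k
  let S1 := pvUp t (2 * k + 2) 0
  pvDown t S1 S1

-- pow(3, -1, p) for p ≥ 1 with gcd(3,p) = 1 (closed form for the builtin; exact mod p)
def pvInv3 (p : Int) : Int :=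
  if PySem.Int.mod p 3 = 2 then (p + 1) / 3 else (2 * p + 1) / 3

-- 'if g is None: g = compute_g(k, p)' — the value actually bound to g afterwards
-- (when compute_g returns None the Python g is never used on inputs admitted by Pre_,
-- so the junk value returned here is never read there either)
def pvGv (p : Int) (g : Option Int) : Int :=
  match g with
  | some x => x
  | none => PySem.Int.mod (2 * pvInv3 p) p

-- 'count[i] += 1'
def pvBump (xs : List Int) (i : Nat) : List Int := xs.set i (xs.getD i 0 + 1)

-- combinations_with_replacement(range(lo, hi+1), m), in lexicographic order
def pvCWR (hi : Int) : Int → Nat → List (List Int)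
  | _, 0 => [[]]
  | lo, m + 1 =>
      (PySem.List.pyRange lo (hi + 1) 1).flatMap (fun v => (pvCWR hi v m).map (fun c => v :: c))

def compute_slice_distribution_full (k : Int) (p : Int) (b0 : Int) (g : Option Int) : List Int × Int :=
  let S : Int := (computeS k.toNat : Nat)
  let maxB : Int := S - k
  let gv : Int := pvGv p g
  let count : List Int := List.replicate p.toNat 0
  let shift : Int := PySem.Int.powMod 2 b0.toNat p
  if k = 1 then
    if b0 = maxB then (pvBump count (PySem.Int.mod shift p).toNat, 1) else (count, 0)
  else if k = 2 then
    (pvBump count (PySem.Int.mod (shift + gv * PySem.Int.powMod 2 maxB.toNat p) p).toNat, 1)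
  else
    let gpows : List Int := (List.range k.toNat).map (fun j => PySem.Int.powMod gv j p)
    let tpows : List Int := (PySem.List.pyRange 0 (maxB + 1) 1).map (fun b => PySem.Int.powMod 2 b.toNat p)
    let last : Int := PySem.Int.mod (PySem.List.pyGetD gpows (k - 1) 0 * PySem.List.pyGetD tpows maxB 0) p
    (pvCWR maxB b0 (k - 2).toNat).foldl
      (fun acc c =>
        let res := PySem.Int.mod
          ((c.zipIdx.foldl
              (fun r x =>
                PySem.Int.mod
                  (r + PySem.List.pyGetD gpows ((x.2 : Int) + 1) 0 * PySem.List.pyGetD tpows x.1 0) p)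
              shift) + last) p
        (pvBump acc.1 res.toNat, acc.2 + 1))
      (count, 0)

-- ===== PORT B =====

-- one v-iteration of the DP: update rows j = t .. 1 (right to left), row t+1 unchanged;
-- the incoming list is rows [T[j], ..., T[t+1]] and j is the index of the first row
def pvUpd (p twov : Int) (gpows : List Int) : Nat → List (List Int) → List (List Int)
  | _, [] => []
  | _, [lastRow] => [lastRow]
  | j, row :: rest =>
      let rest' := pvUpd p twov gpows (j + 1) rest
      let nxt := rest'.headD []
      let wj := PySem.Int.mod (PySem.List.pyGetD gpows (j : Int) 0 * twov) p
      ((PySem.List.pyRange 0 p 1).map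
        (fun r => PySem.List.pyGetD row r 0 + PySem.List.pyGetD nxt (PySem.Int.mod (r - wj) p) 0)) :: rest'

def compute_slice_distribution_full_alt (k : Int) (p : Int) (b0 : Int) (g : Option Int) : List Int × Int :=
  let S : Int := (PySem.Int.bitLength ((3 : Int) ^ k.toNat) : Nat)
  let maxB : Int := S - k
  let gv : Int := pvGv p g
  let shift : Int := PySem.Int.powMod 2 b0.toNat p
  if k = 1 then
    let count := List.replicate p.toNat 0
    if b0 = maxB then (pvBump count (PySem.Int.mod shift p).toNat, 1) else (count, 0)
  else if k = 2 then
    let count := List.replicate p.toNat 0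
    (pvBump count (PySem.Int.mod (shift + gv * PySem.Int.powMod 2 maxB.toNat p) p).toNat, 1)
  else
    let t : Nat := (k - 2).toNat
    if maxB < b0 then (List.replicate p.toNat 0, 0) else
    let gpows : List Int := (List.range (t + 1)).map (fun j => PySem.Int.powMod gv j p)
    -- T holds rows j = 1 .. t+1 (Source B's T[0] is never read or written and is not carried)
    let T0 : List (List Int) :=
      List.replicate t (List.replicate p.toNat 0) ++ [pvBump (List.replicate p.toNat 0) 0]
    let Tfin : List (List Int) :=
      (PySem.List.pyRange maxB (b0 - 1) (-1)).foldl
        (fun T v => pvUpd p (PySem.Int.powMod 2 v.toNat p) gpows 1 T) T0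
    let T1 : List Int := Tfin.headD []
    let off : Int :=
      PySem.Int.mod (shift + PySem.Int.powMod gv (k - 1).toNat p * PySem.Int.powMod 2 maxB.toNat p) p
    ((PySem.List.pyRange 0 p 1).map
        (fun s => PySem.List.pyGetD T1 (PySem.Int.mod (s - off) p) 0),
     T1.sum)

-- ===== PRECONDITION & SPEC =====
-- Pre_ restricts to the function's natural domain — k ≥ 1 tuple components, a
-- positive modulus p, a non-negative bit position b0 (outside it A raises
-- ValueError/IndexError/TypeError or reads its power table at Python's
-- negative wrap-around indices) — and, when g is None and k ≠ 1, to p not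
-- divisible by 3 (otherwise compute_g returns None and A raises TypeError).
def Pre_compute_slice_distribution_full (k : Int) (p : Int) (b0 : Int) (g : Option Int) : Prop :=
  1 ≤ k ∧ 1 ≤ p ∧ 0 ≤ b0 ∧ (k = 1 ∨ g ≠ none ∨ ¬ (3 ∣ p))
instance (k : Int) (p : Int) (b0 : Int) (g : Option Int) : Decidable (Pre_compute_slice_distribution_full k p b0 g) := by
  unfold Pre_compute_slice_distribution_full; infer_instance

def pvWitness_compute_slice_distribution_full : Int × Int × Int × Option Int := (4, 7, 1, none)

def Spec_compute_slice_distribution_full (k : Int) (p : Int) (b0 : Int) (g : Option Int) (out : List Int × Int) : Prop := out = compute_slice_distribution_full_alt k p b0 g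
instance (k : Int) (p : Int) (b0 : Int) (g : Option Int) (out : List Int × Int) : Decidable (Spec_compute_slice_distribution_full k p b0 g out) := by unfold Spec_compute_slice_distribution_full; infer_instance

-- ===== CLAIM (what is proved, stated in full; the proofs are below) =====
def Claim_equal_compute_slice_distribution_full : Prop := ∀ (k : Int) (p : Int) (b0 : Int) (g : Option Int), Dom_compute_slice_distribution_full k p b0 g → Pre_compute_slice_distribution_full k p b0 g → Spec_compute_slice_distribution_full k p b0 g (compute_slice_distribution_full k p b0 g)

-- ===== LEMMAS AND PROOFS =====

lemma pvUp_eq (t L : Nat) (hL : t < 2 ^ L) (hmin : ∀ S' < L, 2 ^ S' ≤ t) :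
    ∀ fuel S, S ≤ L → L ≤ S + fuel → pvUp t fuel S = L := by
  intro fuel
  induction fuel with
  | zero => intro S h1 h2; unfold pvUp; omega
  | succ f ih =>
      intro S h1 h2
      unfold pvUp
      split
      · rename_i hle
        have hSL : S < L := by
          rcases Nat.lt_or_ge S L with h | h
          · exact h
          · have : S = L := by omega
            subst this; omega
        exact ih (S + 1) (by omega) (by omega)
      · rename_i hgt
        rcases Nat.lt_or_ge S L with h | h
        · exact absurd (hmin S h) (by omega)
        · omega

lemma computeS_eq (k : Nat) : computeS k = PySem.Int.bitLength ((3 : Int) ^ k) := by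
  set L := PySem.Int.bitLength ((3 : Int) ^ k) with hLdef
  have h3 : ((3 : Int) ^ k).natAbs = 3 ^ k := by
    simp [Int.natAbs_pow]
  have hlt : 3 ^ k < 2 ^ L := by
    have := PySem.Int.lt_two_pow_bitLength ((3 : Int) ^ k)
    rwa [h3] at this
  have hne : ((3 : Int) ^ k) ≠ 0 := by positivity
  have hge : 2 ^ (L - 1) ≤ 3 ^ k := by
    have := PySem.Int.two_pow_bitLength_le ((3 : Int) ^ k) hne
    rwa [h3] at this
  have hmin : ∀ S' < L, 2 ^ S' ≤ 3 ^ k := by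
    intro S' hS'
    calc 2 ^ S' ≤ 2 ^ (L - 1) := Nat.pow_le_pow_right (by norm_num) (by omega)
      _ ≤ 3 ^ k := hge
  have hL1 : 1 ≤ L := by
    by_contra h
    have : L = 0 := by omega
    rw [this] at hlt
    have : (1:Nat) ≤ 3 ^ k := Nat.one_le_pow _ _ (by norm_num)
    omega
  have hLle : L ≤ 2 * k + 2 := by
    by_contra h
    have h2 : 2 * k + 1 < L := by omega
    have := hmin (2 * k + 1) h2
    have h4 : 3 ^ k < 2 ^ (2 * k + 1) := by
      calc 3 ^ k ≤ 4 ^ k := Nat.pow_le_pow_left (by norm_num) k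
        _ = 2 ^ (2 * k) := by rw [show (4:Nat) = 2^2 by norm_num, ← Nat.pow_mul]
        _ < 2 ^ (2 * k + 1) := Nat.pow_lt_pow_right (by norm_num) (by omega)
    omega
  unfold computeS
  have hup : pvUp (3 ^ k) (2 * k + 2) 0 = L :=
    pvUp_eq (3 ^ k) L hlt hmin (2 * k + 2) 0 (by omega) (by omega)
  simp only [hup]
  -- pvDown at L is the identity: condition false
  obtain ⟨f, hf⟩ : ∃ f, L = f + 1 := ⟨L - 1, by omega⟩
  rw [hf]
  unfold pvDown
  split
  · rename_i hcond
    exfalso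
    have := hcond.2
    have : 2 ^ (f + 1 - 1) ≤ 3 ^ k := hge.trans_eq' (by rw [hf])
    omega
  · rfl

-- weighted sum of a tail starting at position j
def wS (gv p : Int) : Nat → List Int → Int
  | _, [] => 0
  | j, v :: c => PySem.Int.powMod gv j p * PySem.Int.powMod 2 v.toNat p + wS gv p (j + 1) c

def specRow (p gv maxB : Int) (t : Nat) (v : Int) (j : Nat) : List Int :=
  (List.range p.toNat).map (fun (r : Nat) =>
    ((pvCWR maxB v (t + 1 - j)).countP (fun c => PySem.Int.mod (wS gv p j c) p == ((r : Nat) : Int)) : Int))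

def specRows (p gv maxB : Int) (t : Nat) (v : Int) (j : Nat) : List (List Int) :=
  (List.range (t + 2 - j)).map (fun i => specRow p gv maxB t v (j + i))

lemma mod_add_eq_iff {p : Int} (hp : 0 < p) (x y r : Int) (hr0 : 0 ≤ r) (hrp : r < p) :
    (PySem.Int.mod (x + y) p = r) ↔
      (PySem.Int.mod y p = PySem.Int.mod (r - PySem.Int.mod x p) p) := by
  simp only [PySem.Int.mod_eq_emod_of_pos hp]
  have hr : r % p = r := Int.emod_eq_of_lt hr0 hrp
  rw [← hr]
  rw [show (r % p - x % p) % p = (r - x) % p from by rw [← Int.sub_emod]]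
  rw [Int.emod_eq_emod_iff_emod_sub_eq_zero, Int.emod_eq_emod_iff_emod_sub_eq_zero]
  rw [show x + y - r = y - (r - x) from by ring]

lemma cwr_nil {hi lo : Int} (h : hi < lo) (m : Nat) : pvCWR hi lo (m + 1) = [] := by
  unfold pvCWR
  rw [PySem.List.pyRange_one_eq_nil (by omega)]
  rfl

lemma cwr_split {hi lo : Int} (h : lo ≤ hi) (m : Nat) :
    pvCWR hi lo (m + 1) = ((pvCWR hi lo m).map (fun c => lo :: c)) ++ pvCWR hi (lo + 1) (m + 1) := by
  conv_lhs => rw [pvCWR]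
  rw [PySem.List.pyRange_one_cons (by omega), List.flatMap_cons]
  rw [pvCWR]

lemma specRows_cons {p gv maxB : Int} {t : Nat} {v : Int} {j : Nat} (hj : j ≤ t + 1) :
    specRows p gv maxB t v j = specRow p gv maxB t v j :: specRows p gv maxB t v (j + 1) := by
  unfold specRows
  rw [show t + 2 - j = (t + 2 - (j + 1)) + 1 by omega, List.range_succ_eq_map,
    List.map_cons, List.map_map]
  refine List.cons_eq_cons.mpr ⟨by norm_num, ?_⟩
  apply List.map_congr_left
  intro i _
  simp only [Function.comp_apply]
  congr 1
  omega

-- the j = t+1 row is v-independent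
lemma specRow_last {p gv maxB : Int} {t : Nat} (v v' : Int) :
    specRow p gv maxB t v (t + 1) = specRow p gv maxB t v' (t + 1) := by
  unfold specRow
  rw [show t + 1 - (t + 1) = 0 by omega]
  rfl

lemma gpows_get {p gv : Int} {t j : Nat} (hj : j < t + 1) :
    PySem.List.pyGetD ((List.range (t + 1)).map (fun j => PySem.Int.powMod gv j p)) (j : Int) 0
      = PySem.Int.powMod gv j p := by
  rw [PySem.List.pyGetD_natCast, PySem.List.getD_map_range _ _ _ _ hj]

lemma specRow_get {p gv maxB : Int} {t : Nat} {v : Int} {j : Nat} (hp : 0 < p)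
    (i : Int) (hi0 : 0 ≤ i) (hip : i < p) :
    PySem.List.pyGetD (specRow p gv maxB t v j) i 0
      = ((pvCWR maxB v (t + 1 - j)).countP
          (fun c => PySem.Int.mod (wS gv p j c) p == i) : Int) := by
  obtain ⟨n, rfl⟩ : ∃ n : Nat, i = ↑n := ⟨i.toNat, (Int.toNat_of_nonneg hi0).symm⟩
  rw [PySem.List.pyGetD_natCast]
  unfold specRow
  rw [PySem.List.getD_map_range _ _ _ _ (by omega)]

-- the combinatorial core: one DP row update matches the enumeration counts
lemma row_update {p gv maxB : Int} {t : Nat} (hp : 0 < p) {v : Int} (hv : v ≤ maxB)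
    {j : Nat} (hjt : j ≤ t) :
    ((PySem.List.pyRange 0 p 1).map
      (fun r => PySem.List.pyGetD (specRow p gv maxB t (v + 1) j) r 0 +
        PySem.List.pyGetD (specRow p gv maxB t v (j + 1))
          (PySem.Int.mod
            (r - PySem.Int.mod
              (PySem.List.pyGetD ((List.range (t + 1)).map (fun j => PySem.Int.powMod gv j p)) (j : Int) 0
                * PySem.Int.powMod 2 v.toNat p) p) p) 0))
      = specRow p gv maxB t v j := by
  rw [gpows_get (by omega)]
  have hpn : p = ((p.toNat : Nat) : Int) := by omega
  rw [hpn, PySem.List.pyRange_zero_nat, List.map_map]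
  conv_rhs => unfold specRow
  apply List.map_congr_left
  intro r hr
  rw [List.mem_range] at hr
  have hrp : (r : Int) < p := by omega
  simp only [Function.comp_apply]
  rw [← hpn]
  -- resolve the two lookups
  set wj := PySem.Int.mod (PySem.Int.powMod gv j p * PySem.Int.powMod 2 v.toNat p) p with hwj
  have hi2 : 0 ≤ PySem.Int.mod ((r : Int) - wj) p ∧ PySem.Int.mod ((r : Int) - wj) p < p :=
    ⟨PySem.Int.mod_nonneg _ hp, PySem.Int.mod_lt _ hp⟩
  rw [specRow_get hp (r : Int) (by omega) hrp,
      specRow_get hp _ hi2.1 hi2.2]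
  -- split the enumeration
  obtain ⟨m, hm⟩ : ∃ m, t + 1 - j = m + 1 := ⟨t - j, by omega⟩
  rw [hm, cwr_split hv m, List.countP_append, List.countP_map]
  rw [show t + 1 - (j + 1) = m by omega]
  push_cast
  rw [add_comm]
  congr 1
  congr 1
  apply List.countP_congr
  intro c _
  simp only [Function.comp_apply, beq_iff_eq]
  constructor
  · intro h
    exact ((mod_add_eq_iff hp (PySem.Int.powMod gv j p * PySem.Int.powMod 2 v.toNat p)
      (wS gv p (j + 1) c) (r : Int) (by omega) hrp).mpr h)
  · intro h
    exact ((mod_add_eq_iff hp (PySem.Int.powMod gv j p * PySem.Int.powMod 2 v.toNat p)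
      (wS gv p (j + 1) c) (r : Int) (by omega) hrp).mp h)

lemma specRows_last {p gv maxB : Int} {t : Nat} (v : Int) :
    specRows p gv maxB t v (t + 1) = [specRow p gv maxB t v (t + 1)] := by
  unfold specRows
  rw [show t + 2 - (t + 1) = 1 by omega]
  rfl

lemma upd_spec {p gv maxB : Int} {t : Nat} (hp : 0 < p) {v : Int} (hv : v ≤ maxB) :
    ∀ (n j : Nat), j + n = t + 1 → 1 ≤ j →
    pvUpd p (PySem.Int.powMod 2 v.toNat p)
        ((List.range (t + 1)).map (fun j => PySem.Int.powMod gv j p)) j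
        (specRows p gv maxB t (v + 1) j)
      = specRows p gv maxB t v j := by
  intro n
  induction n with
  | zero =>
      intro j hj _
      have hj' : j = t + 1 := by omega
      subst hj'
      rw [specRows_last (v + 1), specRows_last v]
      show pvUpd _ _ _ _ [_] = _
      rw [pvUpd]
      rw [specRow_last (v + 1) v]
  | succ n ih =>
      intro j hj hj1
      have hjt : j ≤ t := by omega
      have e1 := specRows_cons (p := p) (gv := gv) (maxB := maxB) (t := t) (v := v + 1) (j := j) (by omega)
      have e2 := specRows_cons (p := p) (gv := gv) (maxB := maxB) (t := t) (v := v + 1) (j := j + 1) (by omega)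
      have e3 := specRows_cons (p := p) (gv := gv) (maxB := maxB) (t := t) (v := v) (j := j) (by omega)
      have e4 := specRows_cons (p := p) (gv := gv) (maxB := maxB) (t := t) (v := v) (j := j + 1) (by omega)
      have hrest := ih (j + 1) (by omega) (by omega)
      rw [e1, e2, e3]
      show pvUpd _ _ _ j (_ :: _ :: _) = _ :: _
      rw [pvUpd]
      rw [e2] at hrest
      rw [hrest, e4]
      simp only [List.headD_cons]
      rw [← e4]
      congr 1
      exact row_update hp hv hjt
      exact fun h => by simp at h

lemma specRow_empty {p gv maxB : Int} {t : Nat} {v0 : Int} (hv : maxB < v0) {j : Nat}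
    (hj : j ≤ t) : specRow p gv maxB t v0 j = List.replicate p.toNat 0 := by
  unfold specRow
  obtain ⟨m, hm⟩ : ∃ m, t + 1 - j = m + 1 := ⟨t - j, by omega⟩
  rw [hm, cwr_nil hv m]
  simp [List.map_const']

lemma specRow_e0 {p gv maxB : Int} {t : Nat} (hp : 0 < p) (v0 : Int) :
    specRow p gv maxB t v0 (t + 1) = pvBump (List.replicate p.toNat 0) 0 := by
  unfold specRow pvBump
  rw [show t + 1 - (t + 1) = 0 by omega]
  show (List.range p.toNat).map
      (fun (r : Nat) => (([([] : List Int)].countP (fun c => PySem.Int.mod (wS gv p (t+1) c) p == ((r : Nat) : Int))) : Int)) = _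
  have hm0 : PySem.Int.mod (0 : Int) p = 0 := by
    rw [PySem.Int.mod_eq_emod_of_pos hp]; exact Int.zero_emod p
  apply List.ext_getElem
  · simp
  · intro i h1 h2
    simp only [List.getElem_map, List.getElem_range]
    rw [List.getElem_set]
    have hgd : (List.replicate p.toNat (0 : Int)).getD 0 0 = 0 := by
      simp [List.getD]
    simp only [hgd, List.getElem_replicate, List.countP_cons, List.countP_nil]
    have hw : wS gv p (t + 1) ([] : List Int) = 0 := rfl
    rw [hw, hm0]
    by_cases h0 : i = 0
    · subst h0; simp
    · rw [if_neg (show ¬ ((0 : Int) == (i : Int)) = true by simp; omega),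
        if_neg (show ¬ 0 = i by omega)]
      rfl

lemma specRows_base {p gv maxB : Int} {t : Nat} (hp : 0 < p) {v0 : Int} (hv : maxB < v0) :
    specRows p gv maxB t v0 1
      = List.replicate t (List.replicate p.toNat 0) ++ [pvBump (List.replicate p.toNat 0) 0] := by
  apply List.ext_getElem
  · simp [specRows]
  · intro i h1 h2
    simp only [specRows, List.getElem_map, List.getElem_range]
    have hit : i < t + 1 := by simp [specRows] at h1; omega
    by_cases hlt : i < t
    · rw [List.getElem_append_left (by simpa using hlt)]
      simp only [List.getElem_replicate]
      exact specRow_empty hv (by omega)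
    · have hie : t = i := by omega
      subst hie
      rw [List.getElem_append_right (by simp)]
      simp only [List.length_replicate]
      rw [show 1 + t = t + 1 by omega]
      rw [specRow_e0 hp v0]
      simp

lemma fold_rows {p gv maxB : Int} {t : Nat} (hp : 0 < p) :
    ∀ (n : Nat) (v0 : Int), (maxB + 1 - v0).toNat = n →
    (PySem.List.pyRange maxB (v0 - 1) (-1)).foldl
        (fun T v => pvUpd p (PySem.Int.powMod 2 v.toNat p)
          ((List.range (t + 1)).map (fun j => PySem.Int.powMod gv j p)) 1 T)
        (List.replicate t (List.replicate p.toNat 0) ++ [pvBump (List.replicate p.toNat 0) 0])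
      = specRows p gv maxB t v0 1 := by
  intro n
  induction n with
  | zero =>
      intro v0 h0
      have hv : maxB < v0 := by omega
      rw [PySem.List.pyRange_neg_one_eq_nil (by omega)]
      simp only [List.foldl_nil]
      exact (specRows_base hp hv).symm
  | succ n ih =>
      intro v0 h0
      have hv : v0 ≤ maxB := by omega
      have hsplit : PySem.List.pyRange maxB (v0 - 1) (-1)
          = PySem.List.pyRange maxB (v0 + 1 - 1) (-1) ++ [v0] := by
        rw [PySem.List.pyRange_neg_one_eq_reverse, PySem.List.pyRange_neg_one_eq_reverse]
        rw [show v0 - 1 + 1 = v0 by omega, show v0 + 1 - 1 + 1 = v0 + 1 by omega]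
        rw [PySem.List.pyRange_one_cons (by omega : v0 < maxB + 1)]
        rw [List.reverse_cons]
      rw [hsplit, List.foldl_append]
      rw [ih (v0 + 1) (by omega)]
      simp only [List.foldl_cons, List.foldl_nil]
      exact upd_spec hp hv t 1 (by omega) (le_refl 1)

lemma pair_fold {α : Type} (f : α → Nat) (L : List α) :
    ∀ (c0 : List Int) (z : Int),
    L.foldl (fun acc c => (pvBump acc.1 (f c), acc.2 + 1)) (c0, z)
      = (L.foldl (fun cnt c => pvBump cnt (f c)) c0, z + L.length) := by
  induction L with
  | nil => intro c0 z; simp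
  | cons a L ih =>
      intro c0 z
      simp only [List.foldl_cons, List.length_cons]
      rw [ih]
      congr 1
      push_cast
      ring

lemma bump_fold {α : Type} (f : α → Nat) (P : Nat) (L : List α) (h : ∀ a ∈ L, f a < P) :
    L.foldl (fun cnt a => pvBump cnt (f a)) (List.replicate P 0)
      = (List.range P).map (fun (r : Nat) => ((L.countP (fun a => f a == r)) : Int)) := by
  induction L using List.reverseRecOn with
  | nil => simp [List.map_const']
  | append_singleton L a ih =>
      rw [List.foldl_append]
      rw [ih (fun b hb => h b (by simp [hb]))]
      have hq : f a < P := h a (by simp)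
      apply List.ext_getElem
      · simp [pvBump]
      · intro i h1 h2
        simp only [pvBump, List.foldl_cons, List.foldl_nil, List.getElem_set, List.getElem_map, List.getElem_range]
        have hgd : ((List.range P).map
            (fun (r : Nat) => ((L.countP (fun b => f b == r)) : Int))).getD (f a) 0
            = ((L.countP (fun b => f b == f a)) : Int) :=
          PySem.List.getD_map_range _ _ _ _ hq
        have hi1 : i < P := by simpa using h2
        rw [List.countP_append]
        by_cases he : f a = i
        · rw [if_pos he, hgd, ← he]
          simp
        · rw [if_neg he]
          have : List.countP (fun b => f b == i) [a] = 0 := by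
            simp [List.countP_cons]; omega
          rw [this]
          push_cast
          ring

lemma cwr_mem {hi : Int} :
    ∀ (m : Nat) (lo : Int) (c : List Int), c ∈ pvCWR hi lo m →
      c.length = m ∧ ∀ x ∈ c, lo ≤ x ∧ x ≤ hi := by
  intro m
  induction m with
  | zero =>
      intro lo c hc
      simp [pvCWR] at hc
      subst hc
      simp
  | succ m ih =>
      intro lo c hc
      rw [pvCWR, List.mem_flatMap] at hc
      obtain ⟨v, hv, hc⟩ := hc
      rw [List.mem_map] at hc
      obtain ⟨c', hc', rfl⟩ := hc
      rw [PySem.List.mem_pyRange_one] at hv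
      obtain ⟨hl, hb⟩ := ih v c' hc'
      refine ⟨by simp [hl], ?_⟩
      intro x hx
      rcases List.mem_cons.mp hx with rfl | hx'
      · omega
      · have := hb x hx'
        omega

lemma emod_absorb {p : Int} (hp : 0 < p) (a b : Int) :
    PySem.Int.mod (PySem.Int.mod a p + b) p = PySem.Int.mod (a + b) p := by
  simp only [PySem.Int.mod_eq_emod_of_pos hp]
  exact Int.emod_add_emod a p b

lemma emod_absorb_right {p : Int} (hp : 0 < p) (a b : Int) :
    PySem.Int.mod (a + PySem.Int.mod b p) p = PySem.Int.mod (a + b) p := by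
  rw [add_comm a, emod_absorb hp, add_comm]

lemma zip_fold {p gv maxB : Int} {kn : Nat} (hp : 0 < p) :
    ∀ (c : List Int) (n : Nat) (r0 : Int),
    (∀ x ∈ c, 0 ≤ x ∧ x < maxB + 1) → (n + c.length < kn) →
    (c.zipIdx n).foldl
      (fun r (x : Int × Nat) => PySem.Int.mod
        (r + PySem.List.pyGetD ((List.range kn).map (fun j => PySem.Int.powMod gv j p)) ((x.2 : Int) + 1) 0
           * PySem.List.pyGetD ((PySem.List.pyRange 0 (maxB + 1) 1).map (fun b => PySem.Int.powMod 2 b.toNat p)) x.1 0) p)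
      (PySem.Int.mod r0 p)
    = PySem.Int.mod (r0 + wS gv p (n + 1) c) p := by
  intro c
  induction c with
  | nil =>
      intro n r0 _ _
      rw [show wS gv p (n + 1) [] = 0 from rfl, add_zero]
      rfl
  | cons v c ih =>
      intro n r0 hb hlen
      rw [List.zipIdx_cons, List.foldl_cons]
      have hv := hb v (by simp)
      have hg : PySem.List.pyGetD ((List.range kn).map (fun j => PySem.Int.powMod gv j p)) ((n : Int) + 1) 0
          = PySem.Int.powMod gv (n + 1) p := by
        rw [show ((n : Int) + 1) = ((n + 1 : Nat) : Int) by push_cast; ring]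
        rw [PySem.List.pyGetD_natCast, PySem.List.getD_map_range _ _ _ _ (by simp at hlen ⊢; omega)]
      have ht : PySem.List.pyGetD ((PySem.List.pyRange 0 (maxB + 1) 1).map (fun b => PySem.Int.powMod 2 b.toNat p)) v 0
          = PySem.Int.powMod 2 v.toNat p :=
        PySem.List.pyGetD_map_pyRange_of_nonneg _ _ _ _ hv.1 hv.2
      simp only [hg, ht]
      rw [emod_absorb hp]
      rw [ih (n + 1) (r0 + PySem.Int.powMod gv (n + 1) p * PySem.Int.powMod 2 v.toNat p)
        (fun x hx => hb x (by simp [hx])) (by simp at hlen ⊢; omega)]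
      rw [show wS gv p (n + 1) (v :: c)
          = PySem.Int.powMod gv (n + 1) p * PySem.Int.powMod 2 v.toNat p + wS gv p (n + 2) c from rfl]
      ring_nf

lemma sum_counts {α : Type} (f : α → Int) (P : Nat) (L : List α)
    (h : ∀ a ∈ L, 0 ≤ f a ∧ f a < P) :
    ((List.range P).map (fun (r : Nat) => ((L.countP (fun a => f a == ((r : Nat) : Int))) : Int))).sum
      = L.length := by
  induction L with
  | nil => simp
  | cons a L ih =>
      have hmem := h a (by simp)
      have key : ((List.range P).map (fun (r : Nat) => (((a :: L).countP (fun b => f b == ((r : Nat) : Int))) : Int))).sum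
          = ∑ r ∈ Finset.range P, ((((L.countP (fun b => f b == ((r : Nat) : Int))) : Int))
              + if (f a).toNat = r then 1 else 0) := by
        rw [show ((List.range P).map (fun (r : Nat) => (((a :: L).countP (fun b => f b == ((r : Nat) : Int))) : Int))).sum
            = ∑ r ∈ Finset.range P, (((a :: L).countP (fun b => f b == ((r : Nat) : Int))) : Int) from rfl]
        apply Finset.sum_congr rfl
        intro r _
        rw [List.countP_cons]
        by_cases hb : f a = (r : Int)
        · rw [if_pos (by simp [hb]), if_pos (by omega)]
          push_cast; ring
        · rw [if_neg (by simp [hb]), if_neg (by omega)]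
          push_cast; ring
      rw [key, Finset.sum_add_distrib]
      rw [show (∑ r ∈ Finset.range P, ((L.countP (fun b => f b == ((r : Nat) : Int))) : Int))
          = ((List.range P).map (fun (r : Nat) => ((L.countP (fun b => f b == ((r : Nat) : Int))) : Int))).sum from rfl]
      rw [ih (fun x hx => h x (by simp [hx]))]
      rw [Finset.sum_ite_eq (Finset.range P) ((f a).toNat) (fun _ => (1 : Int))]
      rw [if_pos (Finset.mem_range.mpr (by omega))]
      simp

lemma maxB_pos {k : Int} (hk : 1 ≤ k) :
    1 ≤ ((PySem.Int.bitLength ((3 : Int) ^ k.toNat) : Nat) : Int) - k := by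
  have hkn : 1 ≤ k.toNat := by omega
  have hbl : k.toNat + 1 ≤ PySem.Int.bitLength ((3 : Int) ^ k.toNat) := by
    by_contra hcon
    have h1 := PySem.Int.lt_two_pow_bitLength ((3 : Int) ^ k.toNat)
    have hna : ((3 : Int) ^ k.toNat).natAbs = 3 ^ k.toNat := by
      simp [Int.natAbs_pow]
    rw [hna] at h1
    have h2 : (2 : Nat) ^ PySem.Int.bitLength ((3 : Int) ^ k.toNat) ≤ 2 ^ k.toNat :=
      Nat.pow_le_pow_right (by norm_num) (by omega)
    have h3 : (2 : Nat) ^ k.toNat ≤ 3 ^ k.toNat := Nat.pow_le_pow_left (by norm_num) _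
    omega
  omega

lemma equiv_main : ∀ (k : Int) (p : Int) (b0 : Int) (g : Option Int),
    Pre_compute_slice_distribution_full k p b0 g →
      compute_slice_distribution_full k p b0 g = compute_slice_distribution_full_alt k p b0 g := by
  intro k p b0 g hpre
  obtain ⟨hk, hp, hb0, -⟩ := hpre
  unfold compute_slice_distribution_full compute_slice_distribution_full_alt
  simp only [computeS_eq]
  by_cases hk1 : k = 1
  · rw [if_pos hk1, if_pos hk1]
  · rw [if_neg hk1, if_neg hk1]
    by_cases hk2 : k = 2
    · rw [if_pos hk2, if_pos hk2]
    · rw [if_neg hk2, if_neg hk2]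
      have hk3 : 3 ≤ k := by omega
      have hpp : (0 : Int) < p := by omega
      have hP1 : 1 ≤ p.toNat := by omega
      set S : Int := ((PySem.Int.bitLength ((3 : Int) ^ k.toNat) : Nat) : Int) with hS
      set maxB : Int := S - k with hmaxBdef
      have hmaxB : 1 ≤ maxB := maxB_pos hk
      set gv : Int := pvGv p g with hgv
      set t : Nat := (k - 2).toNat with ht
      have ht1 : 1 ≤ t := by omega
      by_cases hemp : maxB < b0
      · -- empty value range: both sides are the zero distribution
        rw [if_pos hemp]
        obtain ⟨m, hm⟩ : ∃ m, t = m + 1 := ⟨t - 1, by omega⟩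
        rw [hm, cwr_nil hemp m, List.foldl_nil]
      rw [if_neg hemp]
      -- A side: split the pair fold, then characterize the count fold
      have hbound : ∀ (X : Int), (PySem.Int.mod X p).toNat < p.toNat := fun X => by
        have h1 := PySem.Int.mod_nonneg X hpp
        have h2 := PySem.Int.mod_lt X hpp
        omega
      rw [pair_fold]
      rw [bump_fold _ p.toNat _ (fun c _ => hbound _)]
      -- B side: run the DP fold
      rw [fold_rows hpp (maxB + 1 - b0).toNat b0 rfl]
      rw [specRows_cons (by omega : 1 ≤ t + 1)]
      simp only [List.headD_cons]
      rw [Prod.mk.injEq]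
      refine ⟨?_, ?_⟩
      · -- the count arrays agree
        rw [PySem.List.pyRange_zero p, List.map_map]
        apply List.map_congr_left
        intro r hr
        rw [List.mem_range] at hr
        have hrp : ((r : Nat) : Int) < p := by omega
        simp only [Function.comp_apply]
        have hi2a : 0 ≤ PySem.Int.mod (((r : Nat) : Int) -
            PySem.Int.mod (PySem.Int.powMod 2 b0.toNat p +
              PySem.Int.powMod gv (k - 1).toNat p * PySem.Int.powMod 2 maxB.toNat p) p) p :=
          PySem.Int.mod_nonneg _ hpp
        have hi2b : PySem.Int.mod (((r : Nat) : Int) -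
            PySem.Int.mod (PySem.Int.powMod 2 b0.toNat p +
              PySem.Int.powMod gv (k - 1).toNat p * PySem.Int.powMod 2 maxB.toNat p) p) p < p :=
          PySem.Int.mod_lt _ hpp
        rw [specRow_get hpp _ hi2a hi2b]
        rw [show t + 1 - 1 = t by omega]
        congr 1
        apply List.countP_congr
        intro c hc
        obtain ⟨hlen, hbnds⟩ := cwr_mem t b0 c hc
        have hGL : PySem.List.pyGetD ((List.range k.toNat).map (fun j => PySem.Int.powMod gv j p)) (k - 1) 0
            = PySem.Int.powMod gv (k - 1).toNat p := by
          have h1 : PySem.List.pyGetD ((List.range k.toNat).map (fun j => PySem.Int.powMod gv j p))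
              ((((k - 1).toNat : Nat)) : Int) 0 = PySem.Int.powMod gv (k - 1).toNat p := by
            rw [PySem.List.pyGetD_natCast]
            exact PySem.List.getD_map_range _ _ _ _ (by omega)
          rw [← h1]
          congr 1
          omega
        have hTL : PySem.List.pyGetD ((PySem.List.pyRange 0 (maxB + 1) 1).map (fun b => PySem.Int.powMod 2 b.toNat p)) maxB 0
            = PySem.Int.powMod 2 maxB.toNat p :=
          PySem.List.pyGetD_map_pyRange_of_nonneg (fun b => PySem.Int.powMod 2 b.toNat p)
            (maxB + 1) maxB 0 (by omega) (by omega)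
        have hzf := zip_fold (gv := gv) (maxB := maxB) (kn := k.toNat) hpp c 0 ((2 : Int) ^ b0.toNat)
          (fun x hx => by have := hbnds x hx; omega)
          (by simp only [hlen]; omega)
        rw [show PySem.Int.powMod 2 b0.toNat p = PySem.Int.mod ((2 : Int) ^ b0.toNat) p from rfl]
        rw [hzf, hGL, hTL]
        simp only [Nat.zero_add, beq_iff_eq]
        set GT : Int := PySem.Int.powMod gv (k - 1).toNat p * PySem.Int.powMod 2 maxB.toNat p with hGT
        have hoff : PySem.Int.mod (PySem.Int.mod ((2 : Int) ^ b0.toNat) p + GT) p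
            = PySem.Int.mod ((2 : Int) ^ b0.toNat + GT) p := emod_absorb hpp _ _
        have habs : PySem.Int.mod (PySem.Int.mod ((2 : Int) ^ b0.toNat + wS gv p 1 c) p + PySem.Int.mod GT p) p
            = PySem.Int.mod (((2 : Int) ^ b0.toNat + GT) + wS gv p 1 c) p := by
          rw [emod_absorb hpp, emod_absorb_right hpp]
          ring_nf
        rw [habs, hoff]
        have hmm := mod_add_eq_iff hpp ((2 : Int) ^ b0.toNat + GT) (wS gv p 1 c) ((r : Nat) : Int) (by omega) hrp
        have hnn : 0 ≤ PySem.Int.mod (((2 : Int) ^ b0.toNat + GT) + wS gv p 1 c) p :=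
          PySem.Int.mod_nonneg _ hpp
        constructor
        · intro h
          exact hmm.mp (by omega)
        · intro h
          have h2 := hmm.mpr h
          omega
      · -- the tuple counts agree
        have hsum := sum_counts (fun c => PySem.Int.mod (wS gv p 1 c) p) p.toNat (pvCWR maxB b0 t)
          (fun c _ => ⟨PySem.Int.mod_nonneg _ hpp, by
            show PySem.Int.mod (wS gv p 1 c) p < ((p.toNat : Nat) : Int)
            have := PySem.Int.mod_lt (wS gv p 1 c) hpp
            omega⟩)
        unfold specRow
        rw [show t + 1 - 1 = t by omega]
        rw [hsum]
        ring

-- ===== VERDICT (by name: the statement is the Claim_ definition above) =====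
theorem compute_slice_distribution_full_spec : Claim_equal_compute_slice_distribution_full := by
  intro k p b0 g _hdom hpre
  show compute_slice_distribution_full k p b0 g = compute_slice_distribution_full_alt k p b0 g
  exact equiv_main k p b0 g hpre
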